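-- pv_equiv track=rewrite | github.com/rajeshja/pdf2cbx | core/layout_detector.py | _merge_nearby_runs
-- ===== SOURCE A (Python) =====
-- def _merge_nearby_runs(runs: list[tuple[int, int]], gap: int) -> list[tuple[int, int]]:
--     if not runs:
--         return []
--     merged = [runs[0]]
--     for start, end in runs[1:]:
--         prev_start, prev_end = merged[-1]
--         if start - prev_end <= gap:
--             merged[-1] = (prev_start, end)
--         else:
--             merged.append((start, end))
--     return merged
-- ===== SOURCE B (Python) =====
-- def _merge_nearby_runs(runs: list[tuple[int, int]], gap: int) -> list[tuple[int, int]]: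
--     if not runs:
--         return []
--     # Phase 1: partition the runs into contiguous groups, splitting between
--     # consecutive ORIGINAL runs whose gap exceeds `gap`.
--     groups = [[runs[0]]]
--     for prev, cur in zip(runs, runs[1:]):
--         if cur[0] - prev[1] > gap:
--             groups.append([cur])
--         else:
--             groups[-1].append(cur)
--     # Phase 2: each group becomes (first run's start, last run's end).
--     return [(g[0][0], g[-1][1]) for g in groups]
-- ===== Notes on version B (the rewrite author's own statement) =====
-- stated objective: alternative
-- what changed: B partitions the runs into contiguous groups by comparing consecutive original runs (two-phase: group, then map each group to (first start, last end)), instead of A's single pass that rewrites the last merged interval in place.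
import Mathlib
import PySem

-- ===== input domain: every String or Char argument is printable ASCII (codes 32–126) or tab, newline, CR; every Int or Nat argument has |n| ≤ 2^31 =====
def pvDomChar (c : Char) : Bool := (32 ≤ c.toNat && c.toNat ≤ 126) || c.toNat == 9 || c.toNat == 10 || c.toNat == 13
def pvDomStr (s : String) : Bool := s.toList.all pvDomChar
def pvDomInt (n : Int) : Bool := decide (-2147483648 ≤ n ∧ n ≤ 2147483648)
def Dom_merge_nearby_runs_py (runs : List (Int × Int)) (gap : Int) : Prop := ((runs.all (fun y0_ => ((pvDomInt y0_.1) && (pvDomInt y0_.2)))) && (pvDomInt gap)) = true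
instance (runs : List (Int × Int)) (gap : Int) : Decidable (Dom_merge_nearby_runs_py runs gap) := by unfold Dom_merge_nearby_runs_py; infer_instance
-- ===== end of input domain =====

-- B re-decomposes the task: group the runs by comparing consecutive ORIGINAL runs, then map
-- each group to (first start, last end); same O(n) cost, different structure ("alternative").

-- ===== PORT A =====
-- one loop step of A: read merged[-1], either rewrite it in place or append
def pvMergeStep (gap : Int) (merged : List (Int × Int)) (r : Int × Int) : List (Int × Int) :=
  let prev := merged.getLastD (0, 0)
  if r.1 - prev.2 ≤ gap then merged.dropLast ++ [(prev.1, r.2)]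
  else merged ++ [r]

def merge_nearby_runs_py (runs : List (Int × Int)) (gap : Int) : List (Int × Int) :=
  match runs with
  | [] => []
  | r0 :: rest => rest.foldl (pvMergeStep gap) [r0]

-- ===== PORT B =====
-- one loop step of B: compare the consecutive original pair (prev, cur); start a new group or
-- append cur to the last group (Python's groups[-1].append)
def pvGroupStep (gap : Int) (groups : List (List (Int × Int))) (pc : (Int × Int) × (Int × Int)) : List (List (Int × Int)) :=
  if pc.2.1 - pc.1.2 > gap then groups ++ [[pc.2]]
  else groups.dropLast ++ [groups.getLastD [] ++ [pc.2]]

-- (g[0][0], g[-1][1])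
def pvGroupToRun (g : List (Int × Int)) : Int × Int :=
  ((g.headD (0, 0)).1, (g.getLastD (0, 0)).2)

def merge_nearby_runs_py_alt (runs : List (Int × Int)) (gap : Int) : List (Int × Int) :=
  match runs with
  | [] => []
  | r0 :: rest =>
    (((r0 :: rest).zip rest).foldl (pvGroupStep gap) [[r0]]).map pvGroupToRun

-- ===== PRECONDITION & SPEC =====
def Spec_merge_nearby_runs_py (runs : List (Int × Int)) (gap : Int) (out : List (Int × Int)) : Prop := out = merge_nearby_runs_py_alt runs gap
instance (runs : List (Int × Int)) (gap : Int) (out : List (Int × Int)) : Decidable (Spec_merge_nearby_runs_py runs gap out) := by unfold Spec_merge_nearby_runs_py; infer_instance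

-- ===== CLAIM (what is proved, stated in full; the proofs are below) =====
def Claim_equal_merge_nearby_runs_py : Prop := ∀ (runs : List (Int × Int)) (gap : Int), Dom_merge_nearby_runs_py runs gap → Spec_merge_nearby_runs_py runs gap (merge_nearby_runs_py runs gap)

-- ===== LEMMAS AND PROOFS =====

-- common recursive characterisation: cur = (accumulated start, previous run's end)
def pvSpec (gap : Int) : Int × Int → List (Int × Int) → List (Int × Int)
  | cur, [] => [cur]
  | cur, r :: rest =>
    if r.1 - cur.2 ≤ gap then pvSpec gap (cur.1, r.2) rest
    else cur :: pvSpec gap r rest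

theorem pvA_eq_spec (gap : Int) (rest : List (Int × Int)) :
    ∀ (acc : List (Int × Int)) (cur : Int × Int),
      rest.foldl (pvMergeStep gap) (acc ++ [cur]) = acc ++ pvSpec gap cur rest := by
  induction rest with
  | nil => intro acc cur; simp [pvSpec]
  | cons r rest ih =>
    intro acc cur
    simp only [List.foldl_cons, pvMergeStep, List.getLastD_concat, List.dropLast_concat, pvSpec]
    by_cases h : r.1 - cur.2 ≤ gap
    · simpa [h] using ih acc (cur.1, r.2)
    · simp only [if_neg h]
      rw [show (acc ++ [cur]) ++ [r] = (acc ++ [cur]) ++ [r] from rfl, ih (acc ++ [cur]) r]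
      simp

theorem pvB_eq_spec (gap : Int) (rest : List (Int × Int)) :
    ∀ (p : Int × Int) (gacc : List (List (Int × Int))) (a : Int × Int) (gt : List (Int × Int)),
      (a :: gt).getLastD (0, 0) = p →
      (((p :: rest).zip rest).foldl (pvGroupStep gap) (gacc ++ [a :: gt])).map pvGroupToRun
        = gacc.map pvGroupToRun ++ pvSpec gap (a.1, p.2) rest := by
  induction rest with
  | nil =>
    intro p gacc a gt hlast
    simp [pvSpec, pvGroupToRun]
    rw [← List.getLastD_eq_getLast?, hlast]
  | cons r rest ih =>
    intro p gacc a gt hlast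
    simp only [List.zip_cons_cons, List.foldl_cons, pvGroupStep, pvSpec]
    by_cases h : r.1 - p.2 ≤ gap
    · have hnot : ¬ (r.1 - p.2 > gap) := by omega
      simp only [if_neg hnot, if_pos h, List.getLastD_concat, List.dropLast_concat]
      have : (a :: gt) ++ [r] = a :: (gt ++ [r]) := rfl
      rw [this, ih r gacc a (gt ++ [r])
        (by rw [show a :: (gt ++ [r]) = (a :: gt) ++ [r] from rfl]; exact List.getLastD_concat)]
    · have hgt : r.1 - p.2 > gap := by omega
      simp only [if_pos hgt, if_neg h]
      have : (gacc ++ [a :: gt]) ++ [[r]] = (gacc ++ [a :: gt]) ++ [r :: ([] : List (Int × Int))] := rfl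
      rw [this, ih r (gacc ++ [a :: gt]) r [] rfl]
      simp [pvGroupToRun]
      rw [← List.getLastD_eq_getLast?, hlast]

-- ===== VERDICT (by name: the statement is the Claim_ definition above) =====
theorem merge_nearby_runs_py_spec : Claim_equal_merge_nearby_runs_py := by
  intro runs gap _
  unfold Spec_merge_nearby_runs_py
  cases runs with
  | nil => rfl
  | cons r0 rest =>
    show rest.foldl (pvMergeStep gap) [r0]
        = (((r0 :: rest).zip rest).foldl (pvGroupStep gap) [[r0]]).map pvGroupToRun
    have hA := pvA_eq_spec gap rest [] r0
    have hB := pvB_eq_spec gap rest r0 [] r0 [] rfl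
    simp only [List.nil_append, List.map_nil] at hA hB
    rw [hA, hB]
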